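-- pv_equiv track=rewrite | github.com/lxm090120/DynamicScaler | utils/diffusion_utils.py | expand_per_frame_prompts
-- ===== SOURCE A (Python) =====
-- def expand_per_frame_prompts(origin_prompt_dict, total_frames_num):
--     # 先将原始prompt字典的键按升序排序
--     sorted_keys = sorted(origin_prompt_dict.keys())
--     frame_prompts = {}
--
--     # 遍历所有帧
--     for i in range(total_frames_num):
--         # 找到当前帧对应的 prompt
--         for start_frame in sorted_keys[::-1]:  # 从后向前找，以便找到最后一个小于等于当前帧的起始帧
--             if i >= start_frame:
--                 frame_prompts[i] = origin_prompt_dict[start_frame]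
--                 break
--
--     return frame_prompts
-- ===== SOURCE B (Python) =====
-- def expand_per_frame_prompts(origin_prompt_dict, total_frames_num):
--     # Single two-pointer sweep: sort items once by key, then walk the frames,
--     # advancing through the sorted items and remembering the current prompt.
--     items = sorted(origin_prompt_dict.items(), key=lambda kv: kv[0])
--     frame_prompts = {}
--     j = 0
--     cur = None
--     for i in range(total_frames_num):
--         while j < len(items) and items[j][0] <= i:
--             cur = items[j][1]
--             j += 1
--         if cur is not None:
--             frame_prompts[i] = cur
--     return frame_prompts
-- ===== Notes on version B (the rewrite author's own statement) =====
-- stated objective: faster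
-- what changed: Replaces A's per-frame reverse scan over all sorted keys with a single two-pointer sweep: items are sorted once by key and a cursor advances monotonically through them while walking the frames, carrying the currently active prompt.
import Mathlib
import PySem

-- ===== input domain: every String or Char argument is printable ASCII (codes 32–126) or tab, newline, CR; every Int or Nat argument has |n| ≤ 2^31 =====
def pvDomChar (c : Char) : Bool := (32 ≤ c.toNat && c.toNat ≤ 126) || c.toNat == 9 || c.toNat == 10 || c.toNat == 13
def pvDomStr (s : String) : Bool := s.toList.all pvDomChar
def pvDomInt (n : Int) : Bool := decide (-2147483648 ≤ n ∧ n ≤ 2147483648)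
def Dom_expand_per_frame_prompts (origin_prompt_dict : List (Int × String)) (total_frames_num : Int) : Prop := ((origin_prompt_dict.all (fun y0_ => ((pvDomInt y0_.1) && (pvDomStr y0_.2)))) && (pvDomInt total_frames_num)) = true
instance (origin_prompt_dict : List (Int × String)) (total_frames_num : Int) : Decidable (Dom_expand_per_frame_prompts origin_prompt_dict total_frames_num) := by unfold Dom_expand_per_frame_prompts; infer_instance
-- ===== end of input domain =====

-- B replaces A's per-frame reverse scan over all sorted keys by a single two-pointer sweep
-- over the items sorted once by key (objective: faster; asymptotic, O(F*K) -> O(K log K + F)).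

-- ===== PORT A =====
-- inner `for start_frame in sorted_keys[::-1]: if i >= start_frame: frame_prompts[i] = …; break` loop;
-- `origin_prompt_dict[start_frame]` is exact as `(d.get? k).getD ""` since every scanned k is a key of d.
def pvInnerA (d : PySem.Dict Int String) (i : Int) (fp : PySem.Dict Int String) :
    List Int → PySem.Dict Int String
  | [] => fp
  | k :: rest =>
      if k ≤ i then fp.insert i ((d.get? k).getD "")
      else pvInnerA d i fp rest

def expand_per_frame_prompts (origin_prompt_dict : List (Int × String)) (total_frames_num : Int) : List (Int × String) :=
  let d := PySem.Dict.ofList origin_prompt_dict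
  let sorted_keys := PySem.List.sorted d.keys (fun k => k) false
  -- `sorted_keys[::-1]` is `sorted_keys.reverse` (PySem.List.slice?_none_none_neg_one)
  let frame_prompts := (PySem.List.pyRange 0 total_frames_num 1).foldl
    (fun fp i => pvInnerA d i fp sorted_keys.reverse) PySem.Dict.empty
  frame_prompts.items

-- ===== PORT B =====
-- the `while j < len(items) and items[j][0] <= i: cur = items[j][1]; j += 1` loop of B,
-- with the not-yet-consumed suffix `items[j:]` as the first argument
def pvAdvanceB (i : Int) : List (Int × String) → Option String → List (Int × String) × Option String
  | [], cur => ([], cur)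
  | (k, v) :: rest, cur => if k ≤ i then pvAdvanceB i rest (some v) else ((k, v) :: rest, cur)

-- one iteration of B's `for i in range(total_frames_num)` loop
def pvStepB (st : List (Int × String) × Option String × PySem.Dict Int String) (i : Int) :
    List (Int × String) × Option String × PySem.Dict Int String :=
  match pvAdvanceB i st.1 st.2.1 with
  | (rem, some v) => (rem, some v, st.2.2.insert i v)
  | (rem, none) => (rem, none, st.2.2)

def expand_per_frame_prompts_alt (origin_prompt_dict : List (Int × String)) (total_frames_num : Int) : List (Int × String) :=
  let items := PySem.List.sorted (PySem.Dict.ofList origin_prompt_dict).items (fun kv => kv.1) false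
  let final := (PySem.List.pyRange 0 total_frames_num 1).foldl pvStepB
    (items, none, PySem.Dict.empty)
  final.2.2.items

-- ===== PRECONDITION & SPEC =====
def Spec_expand_per_frame_prompts (origin_prompt_dict : List (Int × String)) (total_frames_num : Int) (out : List (Int × String)) : Prop := out = expand_per_frame_prompts_alt origin_prompt_dict total_frames_num
instance (origin_prompt_dict : List (Int × String)) (total_frames_num : Int) (out : List (Int × String)) : Decidable (Spec_expand_per_frame_prompts origin_prompt_dict total_frames_num out) := by unfold Spec_expand_per_frame_prompts; infer_instance

-- ===== CLAIM (what is proved, stated in full; the proofs are below) =====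
def Claim_equal_expand_per_frame_prompts : Prop := ∀ (origin_prompt_dict : List (Int × String)) (total_frames_num : Int), Dom_expand_per_frame_prompts origin_prompt_dict total_frames_num → Spec_expand_per_frame_prompts origin_prompt_dict total_frames_num (expand_per_frame_prompts origin_prompt_dict total_frames_num)

-- ===== LEMMAS AND PROOFS =====

-- A's inner break-loop is "first key ≤ i in the scanned list"
lemma pvInnerA_eq_find? (d : PySem.Dict Int String) (i : Int) (fp : PySem.Dict Int String)
    (l : List Int) :
    pvInnerA d i fp l = match l.find? (fun k => decide (k ≤ i)) with
      | some k => fp.insert i ((d.get? k).getD "")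
      | none => fp := by
  induction l with
  | nil => rfl
  | cons k rest ih =>
      by_cases h : k ≤ i
      · simp [pvInnerA, List.find?, h]
      · simp [pvInnerA, List.find?, h, ih]

-- find? over a reversed list is the last satisfying element
lemma pvFind?_reverse {α : Type} (l : List α) (p : α → Bool) :
    l.reverse.find? p = (l.filter p).getLast? := by
  induction l using List.reverseRecOn with
  | nil => rfl
  | append_singleton l a ih =>
      rw [List.reverse_append, List.filter_append]
      cases h : p a
      · simp [h]
      · simp [h, List.getLast?_append]

-- B's while-loop: it drops the consumed prefix and keeps the last consumed value (if any)
lemma pvAdvanceB_spec (i : Int) (rem : List (Int × String)) (cur : Option String) :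
    pvAdvanceB i rem cur =
      (rem.dropWhile (fun kv => decide (kv.1 ≤ i)),
       (((rem.takeWhile (fun kv => decide (kv.1 ≤ i))).map (·.2)).getLast?).or cur) := by
  induction rem generalizing cur with
  | nil => rfl
  | cons kv rest ih =>
      obtain ⟨k, v⟩ := kv
      by_cases h : k ≤ i
      · rw [pvAdvanceB]
        simp only [h, if_pos, ih, List.dropWhile, List.takeWhile]
        cases hm : ((rest.takeWhile (fun kv => decide (kv.1 ≤ i))).map (·.2)).getLast? <;>
          simp [List.getLast?_cons, hm]
      · rw [pvAdvanceB]
        simp [h, List.dropWhile, List.takeWhile]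

-- the main loop invariant: after the frames before `a` are processed, B's state is
-- (suffix of s not yet consumed, value of the last consumed item, the same dict A has)
lemma pvLoop (d : PySem.Dict Int String) (hnd : d.keys.Nodup) (s : List (Int × String))
    (hperm : s.Perm d.items) (hsort : s.Pairwise (fun x y => x.1 < y.1))
    (b : Int) (n : Nat) :
    ∀ (a : Int), (b - a).toNat = n →
      ∀ (pre rem : List (Int × String)) (cur : Option String) (fp : PySem.Dict Int String),
        s = pre ++ rem → (∀ kv ∈ pre, kv.1 < a) → cur = (pre.map (·.2)).getLast? →
        ((PySem.List.pyRange a b 1).foldl pvStepB (rem, cur, fp)).2.2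
          = (PySem.List.pyRange a b 1).foldl
              (fun fp i => pvInnerA d i fp (s.map (·.1)).reverse) fp := by
  induction n with
  | zero =>
      intro a ha pre rem cur fp hs hpre hcur
      rw [PySem.List.pyRange_one_eq_nil (by omega)]
      rfl
  | succ n ih =>
      intro a ha pre rem cur fp hs hpre hcur
      rw [PySem.List.pyRange_one_cons (by omega)]
      simp only [List.foldl_cons]
      -- names for the consumed/remaining parts at frame a
      set p : Int × String → Bool := fun kv => decide (kv.1 ≤ a) with hp
      have hsplit : rem = rem.takeWhile p ++ rem.dropWhile p := (List.takeWhile_append_dropWhile).symm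
      -- every element of the new remainder has key > a
      have hrem' : ∀ kv ∈ rem.dropWhile p, a < kv.1 := by
        intro kv hkv
        have hsub : (rem.dropWhile p).Sublist s :=
          (List.dropWhile_sublist _).trans (hs ▸ List.sublist_append_right pre rem)
        have hpw : (rem.dropWhile p).Pairwise (fun x y => x.1 < y.1) := hsort.sublist hsub
        cases hdd : rem.dropWhile p with
        | nil => rw [hdd] at hkv; cases hkv
        | cons h0 tl =>
            have hh0 : p h0 = false := by
              have := List.head_dropWhile_not p (l := rem) (by rw [hdd]; exact List.cons_ne_nil _ _)
              simpa [hdd] using this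
            have hh0' : a < h0.1 := by
              simp only [hp, decide_eq_false_iff_not, not_le] at hh0; exact hh0
            rw [hdd] at hkv hpw
            rcases List.mem_cons.1 hkv with rfl | hmem
            · exact hh0'
            · exact lt_trans hh0' ((List.pairwise_cons.1 hpw).1 kv hmem)
      -- pre ++ takeWhile = s.filter p
      have hfilter : s.filter p = pre ++ rem.takeWhile p := by
        rw [hs]
        conv_lhs => rw [hsplit]
        rw [List.filter_append, List.filter_append]
        have h1 : pre.filter p = pre := List.filter_eq_self.2 (fun kv hkv => by
          simp only [hp, decide_eq_true_eq]; exact le_of_lt (hpre kv hkv))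
        have h2 : (rem.takeWhile p).filter p = rem.takeWhile p :=
          List.filter_eq_self.2 (fun kv hkv => List.mem_takeWhile_imp hkv)
        have h3 : (rem.dropWhile p).filter p = [] := List.filter_eq_nil_iff.2 (fun kv hkv => by
          simp only [hp, decide_eq_true_eq, not_le]; exact hrem' kv hkv)
        rw [h1, h2, h3, List.append_nil]
      -- B's step
      have hcurq : (((rem.takeWhile p).map (·.2)).getLast?).or cur
          = ((s.filter p).getLast?).map (·.2) := by
        rw [hcur, ← List.getLast?_append, ← List.map_append, ← hfilter, List.getLast?_map]
      have hB : pvStepB (rem, cur, fp) a =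
          (rem.dropWhile p,
           ((s.filter p).getLast?).map (·.2),
           match (s.filter p).getLast? with
             | some kv => fp.insert a kv.2
             | none => fp) := by
        show (match pvAdvanceB a rem cur with
          | (rem, some v) => (rem, some v, fp.insert a v)
          | (rem, none) => (rem, none, fp)) = _
        rw [pvAdvanceB_spec, hcurq]
        cases (s.filter p).getLast? <;> rfl
      -- A's step
      have hA : pvInnerA d a fp (s.map (·.1)).reverse =
          match (s.filter p).getLast? with
            | some kv => fp.insert a ((d.get? kv.1).getD "")
            | none => fp := by
        rw [pvInnerA_eq_find?, pvFind?_reverse]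
        have hfm : (s.map (·.1)).filter (fun k => decide (k ≤ a)) = (s.filter p).map (·.1) := by
          rw [List.filter_map]; rfl
        rw [hfm, List.getLast?_map]
        cases (s.filter p).getLast? <;> rfl
      -- the two inserted values agree
      have hval : (match (s.filter p).getLast? with
            | some kv => fp.insert a kv.2
            | none => fp) =
          (match (s.filter p).getLast? with
            | some kv => fp.insert a ((d.get? kv.1).getD "")
            | none => fp) := by
        cases hg : (s.filter p).getLast? with
        | none => rfl
        | some kv =>
            obtain ⟨k0, v0⟩ := kv
            have hmem : (k0, v0) ∈ d.items :=
              hperm.subset (List.mem_of_mem_filter (List.mem_of_getLast? hg))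
            have hget : d.get? k0 = some v0 := PySem.Dict.get?_of_mem_items d hmem hnd
            simp [hget]
      rw [hB, hA, hval]
      exact ih (a + 1) (by omega) (pre ++ rem.takeWhile p) (rem.dropWhile p) _ _
        (by rw [hs, List.append_assoc, ← hsplit])
        (by intro kv hkv
            rcases List.mem_append.1 hkv with h | h
            · exact lt_trans (hpre kv h) (by omega)
            · have := List.mem_takeWhile_imp h
              simp only [hp, decide_eq_true_eq] at this
              omega)
        (by rw [hfilter, List.getLast?_map])

-- ===== VERDICT (by name: the statement is the Claim_ definition above) =====
theorem expand_per_frame_prompts_spec : Claim_equal_expand_per_frame_prompts := by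
  intro opd total _
  unfold Spec_expand_per_frame_prompts expand_per_frame_prompts expand_per_frame_prompts_alt
  dsimp only
  have hnd : (PySem.Dict.ofList opd).keys.Nodup := PySem.Dict.nodup_keys_ofList opd
  set d := PySem.Dict.ofList opd with hd
  set s := PySem.List.sorted d.items (fun kv => kv.1) false with hsdef
  have hperm : s.Perm d.items := PySem.List.sorted_perm d.items (fun kv => kv.1) false
  have hle : s.Pairwise (fun x y => x.1 ≤ y.1) := PySem.List.sorted_pairwise d.items (fun kv => kv.1)
  have hkeq : d.items.map (·.1) = d.keys := rfl
  have hkeysnd : (s.map (·.1)).Nodup :=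
    ((hperm.map (·.1)).nodup_iff).2 (hkeq ▸ hnd)
  have hne : s.Pairwise (fun x y => x.1 ≠ y.1) := by
    rw [List.Nodup, List.pairwise_map] at hkeysnd; exact hkeysnd
  have hsort : s.Pairwise (fun x y => x.1 < y.1) :=
    (hle.and hne).imp (fun h => lt_of_le_of_ne h.1 h.2)
  have hkeys : PySem.List.sorted d.keys (fun k => k) false = s.map (·.1) := by
    apply PySem.List.sorted_eq_of_perm_of_pairwise_lt
    · exact hkeq ▸ (hperm.map (·.1))
    · exact List.pairwise_map.2 hsort
  rw [hkeys]
  exact (congrArg PySem.Dict.items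
    (pvLoop d hnd s hperm hsort total (total - 0).toNat 0 rfl [] s none PySem.Dict.empty rfl
      (by intro kv h; cases h) rfl)).symm
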